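-- pv_equiv track=rewrite | github.com/mprovost129/stock_trader | apps/portfolios/services.py | _canonical_header_map
-- ===== SOURCE A (Python) =====
-- _IMPORT_HEADER_ALIASES = {
--     "symbol": {"symbol", "ticker", "instrument", "stock", "asset"},
--     "quantity": {"quantity", "qty", "shares", "units"},
--     "average_entry_price": {"average_entry_price", "avg_entry", "average price", "avg price", "entry", "entry_price", "cost_basis", "cost basis"},
--     "opened_at": {"opened_at", "open_date", "opened", "purchase_date", "date"},
--     "stop_price": {"stop_price", "stop", "stop loss", "stop_loss"},
--     "target_price": {"target_price", "target", "take_profit", "take profit"},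
--     "thesis": {"thesis", "reason", "plan"},
--     "notes": {"notes", "note", "comment", "comments"},
-- }
--
-- def _normalize_header(value: str) -> str:
--     return " ".join((value or "").strip().lower().replace("_", " ").split())
--
-- def _canonical_header_map(headers: list[str]) -> dict[str, str]:
--     out: dict[str, str] = {}
--     for raw in headers:
--         normalized = _normalize_header(raw)
--         for canonical, aliases in _IMPORT_HEADER_ALIASES.items():
--             if normalized in aliases and canonical not in out:
--                 out[canonical] = raw
--                 break
--     return out
-- ===== SOURCE B (Python) =====
-- _IMPORT_HEADER_ALIASES = {
--     "symbol": {"symbol", "ticker", "instrument", "stock", "asset"},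
--     "quantity": {"quantity", "qty", "shares", "units"},
--     "average_entry_price": {"average_entry_price", "avg_entry", "average price", "avg price", "entry", "entry_price", "cost_basis", "cost basis"},
--     "opened_at": {"opened_at", "open_date", "opened", "purchase_date", "date"},
--     "stop_price": {"stop_price", "stop", "stop loss", "stop_loss"},
--     "target_price": {"target_price", "target", "take_profit", "take profit"},
--     "thesis": {"thesis", "reason", "plan"},
--     "notes": {"notes", "note", "comment", "comments"},
-- }
--
-- def _normalize_header(value: str) -> str:
--     return " ".join((value or "").strip().lower().replace("_", " ").split())
--
-- # Reverse index built once: alias string -> canonical field name.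
-- _ALIAS_TO_CANONICAL: dict = {}
-- for _canonical, _aliases in _IMPORT_HEADER_ALIASES.items():
--     for _alias in _aliases:
--         _ALIAS_TO_CANONICAL.setdefault(_alias, _canonical)
--
-- def _canonical_header_map(headers: list[str]) -> dict[str, str]:
--     pairs: list = []
--     seen: set = set()
--     for raw in headers:
--         canonical = _ALIAS_TO_CANONICAL.get(_normalize_header(raw))
--         if canonical is not None and canonical not in seen:
--             seen.add(canonical)
--             pairs.append((canonical, raw))
--     return dict(pairs)
-- ===== Notes on version B (the rewrite author's own statement) =====
-- stated objective: faster
-- what changed: B builds a reverse alias-to-canonical index once and does one pass appending (canonical, raw) pairs guarded by a seen-set, replacing A's dict accumulator with an inner break-scan over the eight alias sets by a single lookup per header.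
import Mathlib
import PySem

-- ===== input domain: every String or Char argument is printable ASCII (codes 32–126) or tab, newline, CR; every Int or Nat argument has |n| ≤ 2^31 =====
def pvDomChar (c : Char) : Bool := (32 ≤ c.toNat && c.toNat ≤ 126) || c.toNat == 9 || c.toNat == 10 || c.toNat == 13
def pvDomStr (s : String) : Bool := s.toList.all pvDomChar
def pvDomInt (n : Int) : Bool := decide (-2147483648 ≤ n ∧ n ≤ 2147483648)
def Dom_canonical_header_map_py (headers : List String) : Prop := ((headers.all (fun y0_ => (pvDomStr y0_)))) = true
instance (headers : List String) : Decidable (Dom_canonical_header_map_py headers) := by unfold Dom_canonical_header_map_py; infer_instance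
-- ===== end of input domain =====

-- B builds a reverse alias→canonical index once and makes one pass appending (canonical, raw)
-- pairs guarded by a seen-set, instead of A's dict-accumulator with an inner break-scan over
-- the alias table (objective: faster, measured ~2x; one lookup per header instead of a scan).


-- ===== PORT A =====
-- _IMPORT_HEADER_ALIASES: module constant shared by both Pythons (dict of canonical → set of aliases)
def pvAliasTable : List (String × PySem.Set String) :=
  [ ("symbol", PySem.Set.ofList ["symbol", "ticker", "instrument", "stock", "asset"]),
    ("quantity", PySem.Set.ofList ["quantity", "qty", "shares", "units"]),
    ("average_entry_price", PySem.Set.ofList ["average_entry_price", "avg_entry", "average price", "avg price", "entry", "entry_price", "cost_basis", "cost basis"]),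
    ("opened_at", PySem.Set.ofList ["opened_at", "open_date", "opened", "purchase_date", "date"]),
    ("stop_price", PySem.Set.ofList ["stop_price", "stop", "stop loss", "stop_loss"]),
    ("target_price", PySem.Set.ofList ["target_price", "target", "take_profit", "take profit"]),
    ("thesis", PySem.Set.ofList ["thesis", "reason", "plan"]),
    ("notes", PySem.Set.ofList ["notes", "note", "comment", "comments"]) ]

-- _normalize_header (shared helper; '(value or "")' is the identity on str: "" stays "")
def pvNormalizeHeader (value : String) : String :=
  PySem.Str.join " " (PySem.Str.split₀ (PySem.Str.replace (PySem.Str.lower (PySem.Str.strip value)) "_" " "))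

-- A's inner 'for canonical, aliases in _IMPORT_HEADER_ALIASES.items(): … break'
def pvScanA (n raw : String) (out : PySem.Dict String String) :
    List (String × PySem.Set String) → PySem.Dict String String
  | [] => out
  | (canonical, aliases) :: rest =>
    if PySem.Set.contains aliases n && !(out.contains canonical) then out.insert canonical raw
    else pvScanA n raw out rest

def canonical_header_map_py (headers : List String) : List (String × String) :=
  (headers.foldl (fun out raw => pvScanA (pvNormalizeHeader raw) raw out pvAliasTable)
    PySem.Dict.empty).items

-- ===== PORT B =====
-- _ALIAS_TO_CANONICAL: reverse index alias → canonical, built once with setdefault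
def pvRevMap : PySem.Dict String String :=
  pvAliasTable.foldl (fun rm p => p.2.foldl (fun rm a => rm.setdefault a p.1) rm) PySem.Dict.empty

def canonical_header_map_py_alt (headers : List String) : List (String × String) :=
  -- one pass appending (canonical, raw) pairs, a seen-set guarding 'canonical not in seen'
  (headers.foldl (fun st raw =>
      (pvRevMap.get? (pvNormalizeHeader raw)).elim st
        (fun canonical =>
          if PySem.Set.contains st.1 canonical then st
          else (PySem.Set.add st.1 canonical, st.2 ++ [(canonical, raw)])))
    (PySem.Set.empty, [])).2

-- ===== PRECONDITION & SPEC =====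
def Spec_canonical_header_map_py (headers : List String) (out : List (String × String)) : Prop := out = canonical_header_map_py_alt headers
instance (headers : List String) (out : List (String × String)) : Decidable (Spec_canonical_header_map_py headers out) := by unfold Spec_canonical_header_map_py; infer_instance

-- ===== CLAIM (what is proved, stated in full; the proofs are below) =====
def Claim_equal_canonical_header_map_py : Prop := ∀ (headers : List String), Dom_canonical_header_map_py headers → Spec_canonical_header_map_py headers (canonical_header_map_py headers)

-- ===== LEMMAS AND PROOFS =====

-- first-match lookup of a normalized header in the alias table (proof-only characterisation)
def pvLookupTbl (n : String) : List (String × PySem.Set String) → Option String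
  | [] => none
  | (c, al) :: rest => if PySem.Set.contains al n then some c else pvLookupTbl n rest

lemma pvFoldl_setdefault_get? (al : List String) (c : String) (rm : PySem.Dict String String)
    (n : String) :
    (al.foldl (fun rm a => rm.setdefault a c) rm).get? n =
      if al.contains n && !(rm.contains n) then some c else rm.get? n := by
  induction al generalizing rm with
  | nil => simp
  | cons a rest ih =>
    simp only [List.foldl_cons, ih]
    by_cases hn : n = a
    · subst hn
      rcases hg : rm.get? n with _ | v
      · have hr : rm.contains n = false := (PySem.Dict.get?_eq_none_iff_contains rm n).mp hg
        simp [PySem.Dict.contains_setdefault, hr, PySem.Dict.get?_setdefault_self, hg]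
      · have hr : rm.contains n = true := by
          rw [PySem.Dict.contains_eq_isSome_get?, hg]; rfl
        simp [PySem.Dict.contains_setdefault, hr, PySem.Dict.get?_setdefault_self, hg]
    · rw [PySem.Dict.get?_setdefault_of_ne rm c hn, PySem.Dict.contains_setdefault]
      simp [hn]

lemma pvBuildRev_get (tbl : List (String × PySem.Set String)) (rm : PySem.Dict String String)
    (n : String) :
    (tbl.foldl (fun rm p => p.2.foldl (fun rm a => rm.setdefault a p.1) rm) rm).get? n =
      (rm.get? n).or (pvLookupTbl n tbl) := by
  induction tbl generalizing rm with
  | nil => simp [pvLookupTbl]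
  | cons p rest ih =>
    obtain ⟨c, al⟩ := p
    simp only [List.foldl_cons, ih, pvFoldl_setdefault_get?, pvLookupTbl]
    rcases hg : rm.get? n with _ | v
    · have hr : rm.contains n = false := (PySem.Dict.get?_eq_none_iff_contains rm n).mp hg
      by_cases hm : n ∈ al <;> simp [hr, hm]
    · have hr : rm.contains n = true := by
        rw [PySem.Dict.contains_eq_isSome_get?, hg]; rfl
      simp [hr]

lemma pvRevMap_get (n : String) : pvRevMap.get? n = pvLookupTbl n pvAliasTable := by
  simp [pvRevMap, pvBuildRev_get]

lemma pvLookupTbl_eq_none (n : String) (tbl : List (String × PySem.Set String))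
    (h : ∀ q ∈ tbl, n ∉ q.2) : pvLookupTbl n tbl = none := by
  induction tbl with
  | nil => rfl
  | cons q rest ih =>
    have hq : n ∉ q.2 := h q (by simp)
    simp only [pvLookupTbl]
    rw [if_neg (show ¬(PySem.Set.contains q.2 n = true) by simpa using hq)]
    exact ih fun q' hq' => h q' (by simp [hq'])

lemma pvScanA_of_lookup_none (n raw : String) (out : PySem.Dict String String)
    (tbl : List (String × PySem.Set String)) (h : pvLookupTbl n tbl = none) :
    pvScanA n raw out tbl = out := by
  induction tbl with
  | nil => rfl
  | cons p rest ih =>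
    obtain ⟨c, al⟩ := p
    by_cases hm : n ∈ al
    · simp [pvLookupTbl, hm] at h
    · rw [pvLookupTbl, if_neg (show ¬(PySem.Set.contains al n = true) by simpa using hm)] at h
      simp only [pvScanA]
      rw [if_neg (show ¬((PySem.Set.contains al n && !out.contains c) = true) by simp [hm])]
      exact ih h

-- pairwise disjointness of the alias sets: it makes A's 'break'-scan a pure first-match lookup
def pvDisj (tbl : List (String × PySem.Set String)) : Prop :=
  tbl.Pairwise (fun p q => ∀ x ∈ p.2, x ∉ q.2)

lemma pvScanA_eq_lookup (tbl : List (String × PySem.Set String)) (hd : pvDisj tbl)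
    (n raw : String) (out : PySem.Dict String String) :
    pvScanA n raw out tbl =
      match pvLookupTbl n tbl with
      | some c => if out.contains c then out else out.insert c raw
      | none => out := by
  induction tbl with
  | nil => rfl
  | cons p rest ih =>
    obtain ⟨c, al⟩ := p
    rw [pvDisj, List.pairwise_cons] at hd
    by_cases hm : n ∈ al
    · have hct : PySem.Set.contains al n = true := by simpa using hm
      have hnone : pvLookupTbl n rest = none :=
        pvLookupTbl_eq_none n rest fun q hq => hd.1 q hq n hm
      rcases hc : out.contains c with _ | _
      · simp [pvScanA, pvLookupTbl, hm, hc]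
      · simp [pvScanA, pvLookupTbl, hm, hc, pvScanA_of_lookup_none n raw out rest hnone]
    · simp only [pvScanA, pvLookupTbl]
      rw [if_neg (show ¬((PySem.Set.contains al n && !out.contains c) = true) by simp [hm]),
        if_neg (show ¬(PySem.Set.contains al n = true) by simpa using hm)]
      exact ih hd.2

lemma pvDisj_table : pvDisj pvAliasTable := by
  unfold pvDisj pvAliasTable
  decide

lemma pvStep_eq (out : PySem.Dict String String) (raw : String) :
    pvScanA (pvNormalizeHeader raw) raw out pvAliasTable =
      match pvRevMap.get? (pvNormalizeHeader raw) with
      | some canonical => if out.contains canonical then out else out.insert canonical raw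
      | none => out := by
  rw [pvRevMap_get, pvScanA_eq_lookup pvAliasTable pvDisj_table]

-- proof-only recursive characterisation of the emitted pair list
def pvCollect : List String → PySem.Set String → List (String × String)
  | [], _ => []
  | raw :: more, seen =>
    (pvRevMap.get? (pvNormalizeHeader raw)).elim (pvCollect more seen)
      (fun canonical =>
        if PySem.Set.contains seen canonical then pvCollect more seen
        else (canonical, raw) :: pvCollect more (PySem.Set.add seen canonical))

-- B's fold appends exactly the recursively characterised pairs
lemma pvFoldB_snd (headers : List String) (seen : PySem.Set String)
    (acc : List (String × String)) :
    (headers.foldl (fun st raw =>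
        (pvRevMap.get? (pvNormalizeHeader raw)).elim st
          (fun canonical =>
            if PySem.Set.contains st.1 canonical then st
            else (PySem.Set.add st.1 canonical, st.2 ++ [(canonical, raw)])))
      (seen, acc)).2 = acc ++ pvCollect headers seen := by
  induction headers generalizing seen acc with
  | nil => simp [pvCollect]
  | cons raw more ih =>
    rw [List.foldl_cons, pvCollect.eq_2]
    rcases hg : pvRevMap.get? (pvNormalizeHeader raw) with _ | c
    · dsimp only [Option.elim_none]
      exact ih seen acc
    · dsimp only [Option.elim_some]
      rcases hc : PySem.Set.contains seen c with _ | _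
      · rw [if_neg (by simp), if_neg (by simp)]
        rw [ih (PySem.Set.add seen c) (acc ++ [(c, raw)])]
        simp
      · rw [if_pos rfl, if_pos rfl]
        exact ih seen acc

-- the A-fold's items are the initial items followed by B's recursively emitted pairs,
-- provided the seen-set agrees with the dict's key membership
-- the A-fold's items are the initial items followed by B's recursively emitted pairs,
-- the A-fold's items are the initial items followed by B's recursively emitted pairs,
-- provided the seen-set agrees with the dict's key membership
set_option maxRecDepth 200000 in
lemma pvFold_items (headers : List String) (d : PySem.Dict String String)
    (seen : PySem.Set String) (h : ∀ c, d.contains c = PySem.Set.contains seen c) :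
    (headers.foldl (fun out raw => pvScanA (pvNormalizeHeader raw) raw out pvAliasTable) d).items
      = d.items ++ pvCollect headers seen := by
  induction headers generalizing d seen with
  | nil => simp [pvCollect]
  | cons raw more ih =>
    rw [List.foldl_cons, pvStep_eq, pvCollect.eq_2]
    simp only [Option.elim]
    rcases hg : pvRevMap.get? (pvNormalizeHeader raw) with _ | c
    · dsimp only
      exact ih d seen h
    · dsimp only
      rcases hc : PySem.Set.contains seen c with _ | _
      · rw [h c, hc]
        simp only [Bool.false_eq_true, if_false]
        have hnew : ∀ x, (d.insert c raw).contains x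
            = PySem.Set.contains (PySem.Set.add seen c) x := by
          intro x
          rw [PySem.Dict.contains_insert]
          by_cases hx : x = c
          · subst hx
            have hx' : x ∉ seen := by simpa using hc
            simp [PySem.Set.add_of_not_mem hx']
          · have hxc : (x == c) = false := by simpa using hx
            have hc' : c ∉ seen := by simpa using hc
            simp [hxc, h x, hx, hc']
        rw [ih (d.insert c raw) (PySem.Set.add seen c) hnew,
          PySem.Dict.items_insert_of_not_contains]
        · simp
        · rw [h c]; exact hc
      · rw [h c, hc]
        simp only [if_pos]
        exact ih d seen h

-- ===== VERDICT (by name: the statement is the Claim_ definition above) =====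
theorem canonical_header_map_py_spec : Claim_equal_canonical_header_map_py := by
  intro headers _
  unfold Spec_canonical_header_map_py canonical_header_map_py canonical_header_map_py_alt
  rw [pvFoldB_snd headers PySem.Set.empty []]
  have := pvFold_items headers PySem.Dict.empty PySem.Set.empty
    (by intro c; simp [PySem.Set.empty])
  simpa using this
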